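-- pv_equiv track=rewrite | github.com/kkazlou/coding-problems | codesignal/lateRide/lateRide.py | solution
-- ===== SOURCE A (Python) =====
-- def solution(n):
--
--     hours = n//60
--     minutes = n%60
--
--     time_str = str(hours) + str(minutes)
--
--     sum = 0
--     for i in time_str:
--         sum += int(i)
--
--     return sum
-- ===== SOURCE B (Python) =====
-- def solution(n):
--     hours = n // 60
--     minutes = n % 60
--     total = 0
--     while hours:
--         total += hours % 10
--         hours //= 10
--     while minutes:
--         total += minutes % 10
--         minutes //= 10
--     return total
-- ===== Notes on version B (the rewrite author's own statement) =====
-- stated objective: alternative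
-- what changed: B sums the decimal digits of hours and minutes by modular arithmetic (%10, //10 loops) instead of building a concatenated string and summing int(char) over it.
import Mathlib
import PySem

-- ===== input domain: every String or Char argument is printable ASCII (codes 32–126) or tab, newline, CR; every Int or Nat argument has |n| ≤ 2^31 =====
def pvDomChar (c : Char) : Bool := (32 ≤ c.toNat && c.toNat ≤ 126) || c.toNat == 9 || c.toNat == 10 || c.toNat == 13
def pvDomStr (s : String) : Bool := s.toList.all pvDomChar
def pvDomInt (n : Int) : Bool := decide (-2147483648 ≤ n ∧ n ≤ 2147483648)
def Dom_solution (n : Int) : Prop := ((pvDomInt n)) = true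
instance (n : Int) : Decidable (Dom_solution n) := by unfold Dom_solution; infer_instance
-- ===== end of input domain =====

-- B sums the decimal digits of hours and minutes by %10 / //10 loops instead of
-- iterating characters of a concatenated string (objective: alternative decomposition).


-- ===== PORT A =====
-- int(i) on a one-character string: PySem.Int.ofChars? [c]; under Pre_ (0 ≤ n) every
-- character is a decimal digit so the Option is always some; .getD 0 makes it total.
def solution (n : Int) : Int :=
  let hours := PySem.Int.floordiv n 60
  let minutes := PySem.Int.mod n 60
  let time_str := PySem.Int.toChars hours ++ PySem.Int.toChars minutes
  time_str.foldl (fun s i => s + (PySem.Int.ofChars? [i]).getD 0) 0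

-- ===== PORT B =====
-- the Python 'while x: total += x%10; x //= 10' loop on a non-negative x
def digitLoop (x : Nat) : Int :=
  if x = 0 then 0 else (x % 10 : Nat) + digitLoop (x / 10)
decreasing_by exact Nat.div_lt_self (Nat.pos_of_ne_zero (by assumption)) (by omega)

def solution_alt (n : Int) : Int :=
  let hours := PySem.Int.floordiv n 60
  let minutes := PySem.Int.mod n 60
  digitLoop hours.toNat + digitLoop minutes.toNat

-- ===== PRECONDITION & SPEC =====
-- Pre_ excludes negative n: there A raises ValueError (int('-')) and B's loop never terminates.
def Pre_solution (n : Int) : Prop := 0 ≤ n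
instance (n : Int) : Decidable (Pre_solution n) := by unfold Pre_solution; infer_instance
def pvWitness_solution : Int := (808)

def Spec_solution (n : Int) (out : Int) : Prop := out = solution_alt n
instance (n : Int) (out : Int) : Decidable (Spec_solution n out) := by unfold Spec_solution; infer_instance

-- ===== CLAIM (what is proved, stated in full; the proofs are below) =====
def Claim_equal_solution : Prop := ∀ (n : Int), Dom_solution n → Pre_solution n → Spec_solution n (solution n)

-- ===== LEMMAS AND PROOFS =====

-- value of one character as A's loop reads it
def charVal (c : Char) : Int := (PySem.Int.ofChars? [c]).getD 0

lemma charVal_digitChar (d : Nat) (hd : d < 10) : charVal (Nat.digitChar d) = (d : Int) := by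
  interval_cases d <;> decide

lemma sum_toDigitsCore (fuel : Nat) : ∀ (m : Nat) (ds : List Char), m ≤ fuel →
    ((Nat.toDigitsCore 10 (fuel + 1) m ds).map charVal).sum
      = digitLoop m + (ds.map charVal).sum := by
  induction fuel with
  | zero =>
    intro m ds hm
    have h0 : m = 0 := Nat.le_zero.mp hm
    subst h0
    simp [Nat.toDigitsCore, digitLoop, charVal_digitChar 0 (by omega)]
  | succ fuel ih =>
    intro m ds hm
    rw [Nat.toDigitsCore]
    by_cases h : m / 10 = 0
    · have hm10 : m < 10 := by omega
      simp only [h]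
      rw [digitLoop]
      by_cases hz : m = 0
      · subst hz; simp [charVal_digitChar 0 (by omega)]
      · rw [if_neg hz, digitLoop, if_pos h]
        simp [charVal_digitChar (m % 10) (Nat.mod_lt _ (by omega))]
    · rw [if_neg h]
      have hmpos : m ≠ 0 := by omega
      have h10 : 10 ≤ m := by omega
      have : m / 10 ≤ fuel := by
        have := Nat.div_lt_self (Nat.pos_of_ne_zero hmpos) (by omega : 1 < 10)
        omega
      rw [ih (m / 10) _ this]
      conv_rhs => rw [digitLoop]
      rw [if_neg hmpos]
      simp [charVal_digitChar (m % 10) (Nat.mod_lt _ (by omega))]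
      ring

lemma sum_toChars_nonneg (k : Int) (hk : 0 ≤ k) :
    ((PySem.Int.toChars k).map charVal).sum = digitLoop k.toNat := by
  rw [PySem.Int.toChars, if_neg (by omega)]
  have := sum_toDigitsCore k.toNat k.toNat [] (le_refl _)
  simpa [Nat.toDigits] using this

-- ===== VERDICT (by name: the statement is the Claim_ definition above) =====
theorem solution_spec : Claim_equal_solution := by
  intro n _ hpre
  unfold Spec_solution solution solution_alt
  have h60 : (0:Int) < 60 := by norm_num
  have hh : 0 ≤ PySem.Int.floordiv n 60 := by
    rw [PySem.Int.floordiv_eq_ediv_of_pos h60]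
    exact Int.ediv_nonneg hpre (by omega)
  have hm : 0 ≤ PySem.Int.mod n 60 := PySem.Int.mod_nonneg n h60
  rw [PySem.List.foldl_add, List.map_append, List.sum_append]
  simp only [show (fun i => (PySem.Int.ofChars? [i]).getD 0) = charVal from rfl]
  rw [sum_toChars_nonneg _ hh, sum_toChars_nonneg _ hm]
  simp
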